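-- pv_equiv track=rewrite | github.com/Matthiosso/python-optimization-algorithm | solver_there_is_no_spoon.py | solve_there_is_no_spoon_problem
-- ===== SOURCE A (Python) =====
-- def get_current_idx(i, j, width):
--     return (width*i)+j
--
-- def get_next_node_pos(right_slots):
--     for idx, slot in enumerate(right_slots):
--         if slot == '0':
--             return idx + 1
--     return -1
--
-- def solve_there_is_no_spoon_problem(input_matrix: list):
--     width = len(input_matrix[0])
--     height = len(input_matrix)
--     matrix = [[] for _ in range(width*height)]
--     for i in range(height):
--         line = input_matrix[i]  # width characters, each either 0 or .
--         for j in range(width):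
--             current_idx = get_current_idx(i, j, width)
--             if line[j] == '0':
--                 matrix[current_idx].append(f'{j} {i}')
--
--                 # For right neighbour (do it immediately)
--                 next_node_pos = get_next_node_pos(line[j+1:])
--                 matrix[current_idx].append(f'{j+next_node_pos} {i}') if ((next_node_pos > 0) and (j+next_node_pos) < width) else matrix[current_idx].append('-1 -1')
--
--                 # For bottom neighbour (do it retroactively once found)
--                 if (i > 0):
--                     n = 1
--                     while (i-n) >= 0:
--                         previous_idx = get_current_idx(i-n, j, width)
--                         if len(matrix[previous_idx]) < 3:
--                             matrix[previous_idx].append(f'{j} {i}')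
--                         n+=1
--             else:
--                 matrix[current_idx].append(f'-1 -1') # This line is to keep track of an empty cell
--
--     results = []
--     for i in range(width*height):
--         while len(matrix[i]) < 3: # by now, if the neighbours are unknown, it means they are none.
--             matrix[i].append('-1 -1')
--         if (matrix[i][0]) != '-1 -1':
--             results.append(' '.join(matrix[i]))
--
--     return results
-- ===== SOURCE B (Python) =====
-- def solve_there_is_no_spoon_problem(input_matrix: list):
--     width = len(input_matrix[0])
--     height = len(input_matrix)
--     results = []
--     for i in range(height):
--         for j in range(width):
--             if input_matrix[i][j] == '0':
--                 right = '-1 -1'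
--                 for j2 in range(j + 1, width):
--                     if input_matrix[i][j2] == '0':
--                         right = f'{j2} {i}'
--                         break
--                 bottom = '-1 -1'
--                 for i2 in range(i + 1, height):
--                     if input_matrix[i2][j] == '0':
--                         bottom = f'{j} {i2}'
--                         break
--                 results.append(f'{j} {i} {right} {bottom}')
--     return results
-- ===== Notes on version B (the rewrite author's own statement) =====
-- stated objective: simpler
-- what changed: A builds a width*height matrix of growing per-cell lists, fills right neighbours immediately and bottom neighbours retroactively by walking each column all the way up on every node, then pads and filters the matrix; B just scans each row rightwards and each column downwards from the node, stopping at the first node found, and emits the result string directly.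
import Mathlib
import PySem

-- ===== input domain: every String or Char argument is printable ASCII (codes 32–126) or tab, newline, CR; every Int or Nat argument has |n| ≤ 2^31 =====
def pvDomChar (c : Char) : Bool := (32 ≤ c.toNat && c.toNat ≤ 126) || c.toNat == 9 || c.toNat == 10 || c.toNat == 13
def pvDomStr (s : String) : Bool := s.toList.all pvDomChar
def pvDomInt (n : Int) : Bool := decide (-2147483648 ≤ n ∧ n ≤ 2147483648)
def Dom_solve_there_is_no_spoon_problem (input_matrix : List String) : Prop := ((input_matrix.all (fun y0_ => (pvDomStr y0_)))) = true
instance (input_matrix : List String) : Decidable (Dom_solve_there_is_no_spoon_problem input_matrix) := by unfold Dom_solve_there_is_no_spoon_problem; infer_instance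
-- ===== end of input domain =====

-- B replaces A's retroactive matrix-of-lists bookkeeping by a direct per-node scan for the right and
-- bottom neighbour (objective: simpler; same asymptotic cost).

-- ===== PORT A =====
-- f'{a} {b}' for two Python ints (shared formatting helper for both ports)
def pairStr (a b : Int) : String := PySem.Int.toStr a ++ " " ++ PySem.Int.toStr b

-- all indices are nonnegative Python ints here, so Nat arithmetic is exact
def get_current_idx (i j width : Nat) : Nat := width * i + j

-- 'for idx, slot in enumerate(right_slots): if slot == '0': return idx + 1' / 'return -1'
def gnnp_go : List Char → Nat → Int
  | [], _ => -1
  | c :: rest, idx => if c = '0' then (idx : Int) + 1 else gnnp_go rest (idx + 1)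

def get_next_node_pos (right_slots : List Char) : Int := gnnp_go right_slots 0

-- matrix[k].append(s); k is always in range when reached (exact there)
def appendAt (m : List (List String)) (k : Nat) (s : String) : List (List String) :=
  m.set k (m.getD k [] ++ [s])

-- 'while len(cell) < 3: cell.append('-1 -1')'
def padTo3 (xs : List String) : List String :=
  if h : xs.length < 3 then padTo3 (xs ++ ["-1 -1"]) else xs
  termination_by 3 - xs.length
  decreasing_by simp; omega

def solve_there_is_no_spoon_problem (input_matrix : List String) : List String :=
  let width := ((input_matrix.getD 0 "").toList).length
  let height := input_matrix.length
  let m0 : List (List String) := List.replicate (width * height) []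
  let m1 := (List.range height).foldl (fun m i =>
    let line := (input_matrix.getD i "").toList
    (List.range width).foldl (fun m j =>
      let current_idx := get_current_idx i j width
      if line.getD j ' ' = '0' then
        let m := appendAt m current_idx (pairStr j i)
        let next_node_pos := get_next_node_pos (line.drop (j + 1))
        let m := if 0 < next_node_pos ∧ (j : Int) + next_node_pos < (width : Int) then
            appendAt m current_idx (pairStr ((j : Int) + next_node_pos) i)
          else appendAt m current_idx "-1 -1"
        if 0 < i then
          (List.range i).foldl (fun m n =>
            let previous_idx := get_current_idx (i - 1 - n) j width
            if (m.getD previous_idx []).length < 3 then appendAt m previous_idx (pairStr j i)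
            else m) m
        else m
      else appendAt m current_idx "-1 -1") m) m0
  (((List.range (width * height)).foldl (fun (st : List (List String) × List String) k =>
      let cell := padTo3 (st.1.getD k [])
      let m := st.1.set k cell
      if cell.getD 0 "" ≠ "-1 -1" then (m, st.2 ++ [PySem.Str.join " " cell]) else (m, st.2))
    (m1, ([] : List String)))).2

-- ===== PORT B =====
-- 'for j2 in range(j+1, width): if input_matrix[i][j2] == '0': right = f'{j2} {i}'; break'
def scanRight (line : List Char) (i : Nat) : List Nat → String
  | [] => "-1 -1"
  | j2 :: rest => if line.getD j2 ' ' = '0' then pairStr j2 i else scanRight line i rest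

-- 'for i2 in range(i+1, height): if input_matrix[i2][j] == '0': bottom = f'{j} {i2}'; break'
def scanDown (g : List String) (j : Nat) : List Nat → String
  | [] => "-1 -1"
  | i2 :: rest =>
    if ((g.getD i2 "").toList).getD j ' ' = '0' then pairStr j i2 else scanDown g j rest

def solve_there_is_no_spoon_problem_alt (input_matrix : List String) : List String :=
  let width := ((input_matrix.getD 0 "").toList).length
  let height := input_matrix.length
  (List.range height).foldl (fun results i =>
    (List.range width).foldl (fun results j =>
      if ((input_matrix.getD i "").toList).getD j ' ' = '0' then
        results ++ [pairStr j i ++ " " ++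
          scanRight ((input_matrix.getD i "").toList) i (List.range' (j + 1) (width - (j + 1))) ++
          " " ++ scanDown input_matrix j (List.range' (i + 1) (height - (i + 1)))]
      else results) results) []

-- ===== PRECONDITION & SPEC =====
-- Pre_ excludes exactly the inputs where the Python A raises IndexError: the empty matrix
-- (input_matrix[0]) and matrices with a row shorter than the first row (line[j]).
def Pre_solve_there_is_no_spoon_problem (input_matrix : List String) : Prop :=
  input_matrix ≠ [] ∧
    ∀ s ∈ input_matrix, ((input_matrix.getD 0 "").toList).length ≤ s.toList.length

instance (input_matrix : List String) : Decidable (Pre_solve_there_is_no_spoon_problem input_matrix) := by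
  unfold Pre_solve_there_is_no_spoon_problem; infer_instance

def pvWitness_solve_there_is_no_spoon_problem : List String := ["00.", "..0"]

def Spec_solve_there_is_no_spoon_problem (input_matrix : List String) (out : List String) : Prop :=
  out = solve_there_is_no_spoon_problem_alt input_matrix
instance (input_matrix : List String) (out : List String) : Decidable (Spec_solve_there_is_no_spoon_problem input_matrix out) := by
  unfold Spec_solve_there_is_no_spoon_problem; infer_instance

-- ===== CLAIM (what is proved, stated in full; the proofs are below) =====
def Claim_equal_solve_there_is_no_spoon_problem : Prop := ∀ (input_matrix : List String), Dom_solve_there_is_no_spoon_problem input_matrix → Pre_solve_there_is_no_spoon_problem input_matrix → Spec_solve_there_is_no_spoon_problem input_matrix (solve_there_is_no_spoon_problem input_matrix)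

-- ===== LEMMAS AND PROOFS =====

-- ---- proof-layer definitions (used only by the proofs below) ----

def lineOf (g : List String) (i : Nat) : List Char := (g.getD i "").toList

def isNode (g : List String) (a b : Nat) : Bool := decide ((lineOf g a).getD b ' ' = '0')

-- the right-neighbour string of a node at (i, j), as both programs compute it
def rightRes (g : List String) (i j w : Nat) : String :=
  match ((lineOf g i).drop (j + 1)).findIdx? (fun c => c = '0') with
  | some t => if j + 1 + t < w then pairStr ((j + 1 + t : Nat) : Int) ((i : Nat) : Int) else "-1 -1"
  | none => "-1 -1"

-- indices of the node rows in column b, rows lo ≤ k < hi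
def nbI (g : List String) (b lo hi : Nat) : List Nat :=
  (List.range' lo (hi - lo)).filter (fun k => isNode g k b)

-- the cell list A keeps at (a, b), when column b has been scanned for bottoms up to row ub (excl.)
def cellCore (g : List String) (w ub a b : Nat) : List String :=
  if isNode g a b then
    [pairStr b a, rightRes g a b w] ++
      ((nbI g b (a + 1) ub).map (fun k : Nat => pairStr (b : Int) (k : Int))).take 1
  else "-1 -1" :: ((nbI g b (a + 1) ub).map (fun k : Nat => pairStr (b : Int) (k : Int))).take 2

-- A's matrix when rows < i are processed and row i is processed for columns < j
def midCell (g : List String) (w i j a b : Nat) : List String :=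
  if a < i ∨ (a = i ∧ b < j) then cellCore g w (if b < j then i + 1 else i) a b else []

-- A's matrix during the retroactive walk of node (i, j): column j updated for rows ≥ r
def retroCell (g : List String) (w i j r a b : Nat) : List String :=
  if a < i ∨ (a = i ∧ b ≤ j) then
    cellCore g w (if b < j ∨ (b = j ∧ r ≤ a) then i + 1 else i) a b
  else []

def mSt (w h : Nat) (cell : Nat → Nat → List String) : List (List String) :=
  (List.range (w * h)).map (fun k => cell (k / w) (k % w))

-- ---- basic facts about mSt ----

theorem mSt_length (w h : Nat) (cell : Nat → Nat → List String) :
    (mSt w h cell).length = w * h := by simp [mSt]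

theorem mSt_getD_of_lt (w h : Nat) (cell : Nat → Nat → List String) (k : Nat) (hk : k < w * h) :
    (mSt w h cell).getD k [] = cell (k / w) (k % w) := by
  simp [mSt, List.getD_eq_getElem?_getD, List.getElem?_map, List.getElem?_range, hk]

theorem idx_div (w a b : Nat) (hb : b < w) : (w * a + b) / w = a := by
  rw [Nat.mul_add_div (by omega)]
  simp [Nat.div_eq_of_lt hb]

theorem idx_mod (w a b : Nat) (hb : b < w) : (w * a + b) % w = b := by
  rw [Nat.mul_add_mod]
  exact Nat.mod_eq_of_lt hb

theorem idx_lt (w h a b : Nat) (ha : a < h) (hb : b < w) : w * a + b < w * h := by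
  have h1 : w * a + b < w * (a + 1) := by rw [Nat.mul_succ]; omega
  have h2 : w * (a + 1) ≤ w * h := Nat.mul_le_mul_left w (by omega)
  omega

theorem mSt_getD (w h : Nat) (cell : Nat → Nat → List String) (a b : Nat)
    (ha : a < h) (hb : b < w) : (mSt w h cell).getD (w * a + b) [] = cell a b := by
  rw [mSt_getD_of_lt w h cell _ (idx_lt w h a b ha hb), idx_div w a b hb, idx_mod w a b hb]

theorem mSt_congr (w h : Nat) (cell cell' : Nat → Nat → List String)
    (H : ∀ a b, a < h → b < w → cell a b = cell' a b) : mSt w h cell = mSt w h cell' := by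
  unfold mSt
  apply List.map_congr_left
  intro k hk
  rw [List.mem_range] at hk
  have hw : 0 < w := by
    by_contra h0
    simp [Nat.eq_zero_of_not_pos h0] at hk
  exact H _ _ (Nat.div_lt_of_lt_mul (Nat.mul_comm w h ▸ hk)) (Nat.mod_lt _ hw)

theorem mSt_set (w h : Nat) (cell : Nat → Nat → List String) (a b : Nat) (v : List String)
    (ha : a < h) (hb : b < w) :
    (mSt w h cell).set (w * a + b) v =
      mSt w h (fun x y => if x = a ∧ y = b then v else cell x y) := by
  apply List.ext_getElem
  · simp [mSt]
  · intro k hk1 hk2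
    rw [mSt_length] at *
    rw [List.getElem_set]
    unfold mSt
    rw [List.getElem_map, List.getElem_map, List.getElem_range]
    split
    · next heq =>
      subst heq
      simp [idx_div w a b hb, idx_mod w a b hb]
    · next hne =>
      have : ¬ (k / w = a ∧ k % w = b) := by
        rintro ⟨h1, h2⟩
        exact hne (by rw [← h1, ← h2, Nat.div_add_mod])
      simp [this]

theorem appendAt_mSt (w h : Nat) (cell : Nat → Nat → List String) (a b : Nat) (s : String)
    (ha : a < h) (hb : b < w) :
    appendAt (mSt w h cell) (w * a + b) s =
      mSt w h (fun x y => if x = a ∧ y = b then cell a b ++ [s] else cell x y) := by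
  unfold appendAt
  rw [mSt_getD w h cell a b ha hb, mSt_set w h cell a b _ ha hb]

theorem mSt_zero (w h : Nat) : mSt w h (fun _ _ => []) = List.replicate (w * h) [] := by
  unfold mSt
  have : (fun k => (fun (_ _ : Nat) => ([] : List String)) (k / w) (k % w)) = (fun (_ : Nat) => ([] : List String)) := rfl
  rw [this, List.map_const', List.length_range]



-- ---- characterizations of the small helpers ----

theorem nbI_extend (g : List String) (b lo hi : Nat) (h : lo ≤ hi) :
    nbI g b lo (hi + 1) = nbI g b lo hi ++ (if isNode g hi b then [hi] else []) := by
  unfold nbI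
  have : hi + 1 - lo = (hi - lo) + 1 := by omega
  rw [this, List.range'_1_concat, List.filter_append]
  have : lo + (hi - lo) = hi := by omega
  rw [this]
  by_cases hn : isNode g hi b <;> simp [hn]

theorem gnnp_eq (cs : List Char) : ∀ idx : Nat, gnnp_go cs idx =
    (match cs.findIdx? (fun c => c = '0') with
     | some t => ((idx + t + 1 : Nat) : Int)
     | none => -1) := by
  induction cs with
  | nil => intro idx; simp [gnnp_go]
  | cons c rest ih =>
    intro idx
    rw [gnnp_go, List.findIdx?_cons]
    by_cases hc : c = '0'
    · simp [hc]
    · simp only [hc, decide_false, if_false]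
      rw [ih (idx + 1)]
      cases hfi : rest.findIdx? (fun c => c = '0') with
      | none => simp [hfi]
      | some t =>
        simp only [hfi, Option.map_some]
        congr 1
        omega

theorem scanRight_eq (ln : List Char) (i : Nat) : ∀ (n a : Nat), a + n ≤ ln.length →
    scanRight ln i (List.range' a n) =
      (match (ln.drop a).findIdx? (fun c => c = '0') with
       | some t => if t < n then pairStr ((a + t : Nat) : Int) ((i : Nat) : Int) else "-1 -1"
       | none => "-1 -1") := by
  intro n
  induction n with
  | zero =>
    intro a _
    cases hfi : (ln.drop a).findIdx? (fun c => c = '0') <;> simp [scanRight, hfi]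
  | succ n ih =>
    intro a hlen
    have ha : a < ln.length := by omega
    rw [List.range'_succ, scanRight, List.drop_eq_getElem_cons ha, List.findIdx?_cons]
    by_cases hc : ln.getD a ' ' = '0'
    · have hc' : ln[a] = '0' := by rw [← List.getD_eq_getElem ln ' ' ha]; exact hc
      rw [if_pos hc]
      simp only [hc', decide_true, if_true]
      rw [if_pos (by omega : (0:Nat) < n + 1)]
      norm_num
    · have hc' : ¬ ln[a] = '0' := by rw [← List.getD_eq_getElem ln ' ' ha]; exact hc
      rw [if_neg hc]
      rw [ih (a + 1) (by omega)]
      simp only [hc', decide_false, Bool.false_eq_true, if_false]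
      cases hfi : (ln.drop (a + 1)).findIdx? (fun c => c = '0') with
      | none => simp [hfi]
      | some t =>
        simp only [hfi, Option.map_some]
        by_cases h1 : t < n
        · rw [if_pos h1, if_pos (by omega : t + 1 < n + 1)]
          congr 2
          omega
        · rw [if_neg h1, if_neg (by omega : ¬ t + 1 < n + 1)]

theorem rightA_eq (g : List String) (i j w : Nat) :
    (if 0 < get_next_node_pos ((lineOf g i).drop (j + 1)) ∧
        (j : Int) + get_next_node_pos ((lineOf g i).drop (j + 1)) < (w : Int) then
      pairStr ((j : Int) + get_next_node_pos ((lineOf g i).drop (j + 1))) i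
    else "-1 -1") = rightRes g i j w := by
  unfold get_next_node_pos rightRes
  rw [gnnp_eq]
  cases hfi : ((lineOf g i).drop (j + 1)).findIdx? (fun c => c = '0') with
  | none => norm_num
  | some t =>
    simp only
    by_cases hlt : j + 1 + t < w
    · have hcond : (0:Int) < ((0 + t + 1 : Nat) : Int) ∧ (j:Int) + ((0 + t + 1 : Nat) : Int) < (w:Int) := by
        constructor <;> omega
      rw [if_pos hcond, if_pos hlt]
      have harg : (j:Int) + ((0 + t + 1 : Nat) : Int) = ((j + 1 + t : Nat) : Int) := by omega
      rw [harg]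
    · have hcond : ¬ ((0:Int) < ((0 + t + 1 : Nat) : Int) ∧ (j:Int) + ((0 + t + 1 : Nat) : Int) < (w:Int)) := by
        intro hh
        exact hlt (by omega)
      rw [if_neg hcond, if_neg hlt]

theorem scanRight_eq_rightRes (g : List String) (i j w : Nat) (hj : j < w)
    (hlen : w ≤ (lineOf g i).length) :
    scanRight (lineOf g i) i (List.range' (j + 1) (w - (j + 1))) = rightRes g i j w := by
  rw [scanRight_eq (lineOf g i) i (w - (j + 1)) (j + 1) (by omega)]
  unfold rightRes
  cases hfi : ((lineOf g i).drop (j + 1)).findIdx? (fun c => c = '0') with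
  | none => rfl
  | some t =>
    simp only
    by_cases hlt : j + 1 + t < w
    · rw [if_pos (by omega : t < w - (j + 1)), if_pos hlt]
    · rw [if_neg (by omega : ¬ t < w - (j + 1)), if_neg hlt]

-- ---- padTo3 ----

theorem padTo3_one (x : String) : padTo3 [x] = [x, "-1 -1", "-1 -1"] := by
  rw [padTo3]; simp; rw [padTo3]; simp; rw [padTo3]; simp

theorem padTo3_two (x y : String) : padTo3 [x, y] = [x, y, "-1 -1"] := by
  rw [padTo3]; simp; rw [padTo3]; simp

theorem padTo3_three (x y z : String) : padTo3 [x, y, z] = [x, y, z] := by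
  rw [padTo3]; simp

-- ---- strings ----

theorem toDigits_digits_aux (f n : Nat) (acc : List Char) (hacc : ∀ c ∈ acc, c.isDigit = true) :
    ∀ c ∈ Nat.toDigitsCore 10 f n acc, c.isDigit = true := by
  induction f generalizing n acc with
  | zero => simpa [Nat.toDigitsCore]
  | succ f ih =>
    have hd : (Nat.digitChar (n % 10)).isDigit = true := by
      have : n % 10 < 10 := Nat.mod_lt _ (by norm_num)
      interval_cases h : n % 10 <;> simp_all <;> decide
    simp only [Nat.toDigitsCore]
    split
    · intro c hc
      rcases List.mem_cons.mp hc with h | h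
      · subst h; exact hd
      · exact hacc c h
    · refine ih _ _ ?_
      intro c hc
      rcases List.mem_cons.mp hc with h | h
      · subst h; exact hd
      · exact hacc c h

theorem toDigits_digits (n : Nat) : ∀ c ∈ Nat.toDigits 10 n, c.isDigit = true :=
  toDigits_digits_aux _ _ [] (by simp)

theorem toChars_nat_digits (n : Nat) : ∀ c ∈ PySem.Int.toChars (n : Int), c.isDigit = true := by
  unfold PySem.Int.toChars
  rw [if_neg (by simp)]
  simpa using toDigits_digits ((n : Int)).toNat

theorem pairStr_ne (b a : Nat) : pairStr (b : Int) (a : Int) ≠ "-1 -1" := by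
  intro h
  have h' : (pairStr (b : Int) (a : Int)).toList = "-1 -1".toList := by rw [h]
  unfold pairStr at h'
  rw [String.toList_append, String.toList_append, PySem.Int.toList_toStr,
    PySem.Int.toList_toStr] at h'
  have hm : '-' ∈ PySem.Int.toChars (b : Int) ++ " ".toList ++ PySem.Int.toChars (a : Int) := by
    rw [h']; decide
  rcases List.mem_append.mp hm with hm | hm
  · rcases List.mem_append.mp hm with hm | hm
    · have := toChars_nat_digits b '-' hm; simp at this
    · simp at hm
  · have := toChars_nat_digits a '-' hm; simp at this

theorem joinSpace3 (x y z : String) :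
    PySem.Str.join " " [x, y, z] = x ++ " " ++ y ++ " " ++ z := by
  apply String.toList_inj.mp
  rw [PySem.Str.toList_join]
  simp only [List.map_cons, List.map_nil]
  rw [PySem.Chars.join_cons_cons, PySem.Chars.join_cons_cons, PySem.Chars.join_singleton]
  simp [String.toList_append, List.append_assoc]

-- ---- generic loop shapes ----

theorem appendIf_fold {P : Nat → Prop} [DecidablePred P] (f : Nat → String) :
    ∀ (l : List Nat) (r : List String),
      l.foldl (fun r j => if P j then r ++ [f j] else r) r =
        r ++ l.filterMap (fun j => if P j then some (f j) else none) := by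
  intro l
  induction l with
  | nil => simp
  | cons x rest ih =>
    intro r
    by_cases hx : P x <;> simp [hx, ih] 

theorem range_mul_flat (w h : Nat) :
    List.range (w * h) = (List.range h).flatMap (fun a => (List.range w).map (fun b => w * a + b)) := by
  induction h with
  | zero => simp
  | succ h ih =>
    rw [Nat.mul_succ, List.range_add, ih, List.range_succ, List.flatMap_append]
    simp


-- ---- named forms of A's loop bodies ----

def retroB (g : List String) (w i j : Nat) (m : List (List String)) (n : Nat) : List (List String) :=
  if (m.getD (get_current_idx (i - 1 - n) j w) []).length < 3 then
    appendAt m (get_current_idx (i - 1 - n) j w) (pairStr j i)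
  else m

-- zeta-reduced form of the inner loop body of A (definitionally equal to the port's lambda)
def aInner (g : List String) (w i : Nat) (m : List (List String)) (j : Nat) : List (List String) :=
  if ((g.getD i "").toList).getD j ' ' = '0' then
    (fun m2 => if 0 < i then (List.range i).foldl (retroB g w i j) m2 else m2)
      (if 0 < get_next_node_pos (((g.getD i "").toList).drop (j + 1)) ∧
          (j : Int) + get_next_node_pos (((g.getD i "").toList).drop (j + 1)) < (w : Int) then
        appendAt (appendAt m (get_current_idx i j w) (pairStr j i)) (get_current_idx i j w)
          (pairStr ((j : Int) + get_next_node_pos (((g.getD i "").toList).drop (j + 1))) i)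
      else appendAt (appendAt m (get_current_idx i j w) (pairStr j i)) (get_current_idx i j w) "-1 -1")
  else appendAt m (get_current_idx i j w) "-1 -1"

-- zeta-reduced form of the result loop body of A (definitionally equal to the port's lambda)
def aFin (st : List (List String) × List String) (k : Nat) : List (List String) × List String :=
  if (padTo3 (st.1.getD k [])).getD 0 "" ≠ "-1 -1" then
    (st.1.set k (padTo3 (st.1.getD k [])), st.2 ++ [PySem.Str.join " " (padTo3 (st.1.getD k []))])
  else (st.1.set k (padTo3 (st.1.getD k [])), st.2)

theorem A_unfold (g : List String) :
    solve_there_is_no_spoon_problem g =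
      (((List.range (((g.getD 0 "").toList).length * g.length)).foldl aFin
        ((List.range g.length).foldl
          (fun m i => (List.range ((g.getD 0 "").toList).length).foldl
            (aInner g ((g.getD 0 "").toList).length i) m)
          (List.replicate (((g.getD 0 "").toList).length * g.length) []),
         ([] : List String)))).2 := rfl

-- ---- the retroactive bottom-neighbour walk ----

theorem retroCell_outside (g : List String) (w i j r r' a b : Nat)
    (h : ¬ (a = r' ∧ b = j)) (hr : r = r' + 1) :
    retroCell g w i j r a b = retroCell g w i j r' a b := by
  unfold retroCell
  by_cases hdone : a < i ∨ (a = i ∧ b ≤ j)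
  · rw [if_pos hdone, if_pos hdone]
    have : (b < j ∨ (b = j ∧ r ≤ a)) ↔ (b < j ∨ (b = j ∧ r' ≤ a)) := by
      constructor <;> rintro (h1 | ⟨rfl, h2⟩)
      · exact Or.inl h1
      · exact Or.inr ⟨rfl, by omega⟩
      · exact Or.inl h1
      · refine Or.inr ⟨rfl, ?_⟩
        rcases Nat.lt_or_ge a r with hlt | hge
        · exact absurd ⟨by omega, rfl⟩ h
        · exact by omega
    by_cases hub : b < j ∨ (b = j ∧ r ≤ a)
    · rw [if_pos hub, if_pos (this.mp hub)]
    · rw [if_neg hub, if_neg (fun hx => hub (this.mpr hx))]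
  · rw [if_neg hdone, if_neg hdone]

theorem retroStep (g : List String) (w h i j r : Nat) (hh : i < h) (hw : j < w)
    (hr1 : 1 ≤ r) (hri : r ≤ i) (hni : isNode g i j = true) :
    retroB g w i j (mSt w h (fun a b => retroCell g w i j r a b)) (i - r) =
      mSt w h (fun a b => retroCell g w i j (r - 1) a b) := by
  unfold retroB get_current_idx
  have hidx : i - 1 - (i - r) = r - 1 := by omega
  rw [hidx]
  rw [mSt_getD w h _ (r - 1) j (by omega) hw]
  have hc : retroCell g w i j r (r - 1) j = cellCore g w i (r - 1) j := by
    unfold retroCell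
    rw [if_pos (Or.inl (by omega))]
    have : ¬ (j < j ∨ (j = j ∧ r ≤ r - 1)) := by omega
    rw [if_neg this]
  rw [hc]
  have hsucc : r - 1 + 1 = r := by omega
  have hext : nbI g j r (i + 1) = nbI g j r i ++ [i] := by
    rw [nbI_extend g j r i (by omega), if_pos hni]
  have htarget : retroCell g w i j (r - 1) (r - 1) j = cellCore g w (i + 1) (r - 1) j := by
    unfold retroCell
    rw [if_pos (Or.inl (by omega))]
    have : (j < j ∨ (j = j ∧ r - 1 ≤ r - 1)) := Or.inr ⟨rfl, le_refl _⟩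
    rw [if_pos this]
  unfold cellCore
  rw [hsucc]
  by_cases hnd : isNode g (r - 1) j
  · rw [if_pos hnd]
    cases hnb : nbI g j r i with
    | nil =>
      rw [if_pos (by simp)]
      rw [appendAt_mSt w h _ (r - 1) j _ (by omega) hw]
      apply mSt_congr
      intro a b ha hb
      by_cases hab : a = r - 1 ∧ b = j
      · obtain ⟨rfl, rfl⟩ := hab
        rw [if_pos ⟨rfl, rfl⟩, hc, htarget]
        unfold cellCore
        rw [hsucc, hext, hnb, if_pos hnd, if_pos hnd]
        simp
      · rw [if_neg hab]
        exact retroCell_outside g w i j r (r - 1) a b hab (by omega)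
    | cons k ks =>
      rw [if_neg (by simp)]
      apply mSt_congr
      intro a b ha hb
      by_cases hab : a = r - 1 ∧ b = j
      · obtain ⟨rfl, rfl⟩ := hab
        rw [hc, htarget]
        unfold cellCore
        rw [hsucc, hext, hnb, if_pos hnd, if_pos hnd]
        simp
      · exact retroCell_outside g w i j r (r - 1) a b hab (by omega)
  · rw [if_neg hnd]
    rcases hnb : nbI g j r i with _ | ⟨k1, _ | ⟨k2, ks⟩⟩
    · rw [if_pos (by simp)]
      rw [appendAt_mSt w h _ (r - 1) j _ (by omega) hw]
      apply mSt_congr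
      intro a b ha hb
      by_cases hab : a = r - 1 ∧ b = j
      · obtain ⟨rfl, rfl⟩ := hab
        rw [if_pos ⟨rfl, rfl⟩, hc, htarget]
        unfold cellCore
        rw [hsucc, hext, hnb, if_neg hnd, if_neg hnd]
        simp
      · rw [if_neg hab]
        exact retroCell_outside g w i j r (r - 1) a b hab (by omega)
    · rw [if_pos (by simp)]
      rw [appendAt_mSt w h _ (r - 1) j _ (by omega) hw]
      apply mSt_congr
      intro a b ha hb
      by_cases hab : a = r - 1 ∧ b = j
      · obtain ⟨rfl, rfl⟩ := hab
        rw [if_pos ⟨rfl, rfl⟩, hc, htarget]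
        unfold cellCore
        rw [hsucc, hext, hnb, if_neg hnd, if_neg hnd]
        simp
      · rw [if_neg hab]
        exact retroCell_outside g w i j r (r - 1) a b hab (by omega)
    · rw [if_neg (by simp)]
      apply mSt_congr
      intro a b ha hb
      by_cases hab : a = r - 1 ∧ b = j
      · obtain ⟨rfl, rfl⟩ := hab
        rw [hc, htarget]
        unfold cellCore
        rw [hsucc, hext, hnb, if_neg hnd, if_neg hnd]
        simp
      · exact retroCell_outside g w i j r (r - 1) a b hab (by omega)

theorem retroFold (g : List String) (w h i j : Nat) (hh : i < h) (hw : j < w)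
    (hni : isNode g i j = true) :
    ∀ n', n' ≤ i →
      (List.range n').foldl (retroB g w i j) (mSt w h (fun a b => retroCell g w i j i a b)) =
        mSt w h (fun a b => retroCell g w i j (i - n') a b) := by
  intro n'
  induction n' with
  | zero => intro _; simp
  | succ n' ih =>
    intro hn
    rw [List.range_succ, List.foldl_append]
    rw [ih (by omega)]
    simp only [List.foldl_cons, List.foldl_nil]
    have h2 := retroStep g w h i j (i - n') hh hw (by omega) (by omega) hni
    rw [(by omega : i - (i - n') = n')] at h2
    rw [h2]
    have h3 : i - n' - 1 = i - (n' + 1) := by omega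
    rw [h3]


-- ---- row processing ----

theorem midCell_outside (g : List String) (w i j a b : Nat) (hab : ¬ (a = i ∧ b = j))
    (hnn : isNode g i j = false) :
    midCell g w i j a b = midCell g w i (j + 1) a b := by
  unfold midCell
  by_cases hdone : a < i ∨ (a = i ∧ b < j)
  · have hdone' : a < i ∨ (a = i ∧ b < j + 1) := by
      rcases hdone with h1 | ⟨rfl, h2⟩
      · exact Or.inl h1
      · exact Or.inr ⟨rfl, by omega⟩
    rw [if_pos hdone, if_pos hdone']
    by_cases hbj : b < j
    · rw [if_pos hbj, if_pos (by omega : b < j + 1)]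
    · by_cases hbj' : b < j + 1
      · -- b = j, and a < i (a = i ∧ b = j is excluded)
        have hbeq : b = j := by omega
        have hai : a < i := by
          rcases hdone with h1 | ⟨rfl, h2⟩
          · exact h1
          · omega
        rw [if_neg hbj, if_pos hbj']
        subst hbeq
        unfold cellCore
        have hext : nbI g b (a + 1) (i + 1) = nbI g b (a + 1) i := by
          rw [nbI_extend g b (a + 1) i (by omega), hnn]
          simp
        rw [hext]
      · rw [if_neg hbj, if_neg hbj']
  · have hdone' : ¬ (a < i ∨ (a = i ∧ b < j + 1)) := by
      rintro (h1 | ⟨rfl, h2⟩)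
      · exact hdone (Or.inl h1)
      · exact hab ⟨rfl, by omega⟩
    rw [if_neg hdone, if_neg hdone']

theorem midCell_self_empty (g : List String) (w i j : Nat) (hnn : isNode g i j = false) :
    midCell g w i (j + 1) i j = ["-1 -1"] := by
  unfold midCell
  rw [if_pos (Or.inr ⟨rfl, by omega⟩), if_pos (by omega : j < j + 1)]
  unfold cellCore
  rw [hnn]
  simp [nbI]

theorem midCell_start (g : List String) (w i j a b : Nat) (hab : ¬ (a = i ∧ b = j)) :
    midCell g w i j a b = retroCell g w i j i a b := by
  unfold midCell retroCell
  by_cases hdone : a < i ∨ (a = i ∧ b < j)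
  · have hdone' : a < i ∨ (a = i ∧ b ≤ j) := by
      rcases hdone with h1 | ⟨rfl, h2⟩
      · exact Or.inl h1
      · exact Or.inr ⟨rfl, by omega⟩
    rw [if_pos hdone, if_pos hdone']
    by_cases hbj : b < j
    · rw [if_pos hbj, if_pos (Or.inl hbj)]
    · have hcond : ¬ (b < j ∨ (b = j ∧ i ≤ a)) := by
        rintro (h1 | ⟨rfl, h2⟩)
        · exact hbj h1
        · rcases hdone with h1 | ⟨rfl, h3⟩
          · omega
          · exact hbj h3
      rw [if_neg hbj, if_neg hcond]
  · have hdone' : ¬ (a < i ∨ (a = i ∧ b ≤ j)) := by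
      rintro (h1 | ⟨rfl, h2⟩)
      · exact hdone (Or.inl h1)
      · rcases Nat.lt_or_ge b j with h3 | h3
        · exact hdone (Or.inr ⟨rfl, h3⟩)
        · exact hab ⟨rfl, by omega⟩
    rw [if_neg hdone, if_neg hdone']

theorem retroCell_end (g : List String) (w i j a b : Nat) :
    retroCell g w i j 0 a b = midCell g w i (j + 1) a b := by
  unfold midCell retroCell
  by_cases hdone : a < i ∨ (a = i ∧ b ≤ j)
  · have hdone' : a < i ∨ (a = i ∧ b < j + 1) := by omega
    rw [if_pos hdone, if_pos hdone']
    by_cases hub : b < j + 1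
    · have h1 : (b < j ∨ (b = j ∧ 0 ≤ a)) := by omega
      rw [if_pos h1, if_pos hub]
    · have h1 : ¬ (b < j ∨ (b = j ∧ 0 ≤ a)) := by omega
      rw [if_neg h1, if_neg hub]
  · have hdone' : ¬ (a < i ∨ (a = i ∧ b < j + 1)) := by omega
    rw [if_neg hdone, if_neg hdone']

theorem midCell_self_node (g : List String) (w i j : Nat) (hni : isNode g i j = true) :
    retroCell g w i j i i j = [pairStr (j : Int) (i : Int), rightRes g i j w] := by
  unfold retroCell
  rw [if_pos (Or.inr ⟨rfl, le_refl _⟩), if_pos (Or.inr ⟨rfl, le_refl _⟩)]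
  unfold cellCore
  rw [hni]
  simp [nbI]

theorem innerStep (g : List String) (w h i j : Nat) (hh : i < h) (hw : j < w) :
    aInner g w i (mSt w h (fun a b => midCell g w i j a b)) j =
      mSt w h (fun a b => midCell g w i (j + 1) a b) := by
  unfold aInner get_current_idx
  by_cases hn : ((g.getD i "").toList).getD j ' ' = '0'
  · have hni : isNode g i j = true := by simpa [isNode, lineOf] using hn
    rw [if_pos hn]
    beta_reduce
    rw [appendAt_mSt w h _ i j _ hh hw]
    rw [← apply_ite (fun s => appendAt
      (mSt w h fun x y => if x = i ∧ y = j then midCell g w i j i j ++ [pairStr (j:Int) (i:Int)] else midCell g w i j x y)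
      (w * i + j) s)]
    have hr := rightA_eq g i j w
    unfold lineOf at hr
    rw [hr]
    rw [appendAt_mSt w h _ i j _ hh hw]
    have hstart : (fun x y => if x = i ∧ y = j then
        (if i = i ∧ j = j then midCell g w i j i j ++ [pairStr (j:Int) (i:Int)] else midCell g w i j i j) ++ [rightRes g i j w]
        else if x = i ∧ y = j then midCell g w i j i j ++ [pairStr (j:Int) (i:Int)] else midCell g w i j x y) =
        (fun x y => if x = i ∧ y = j then midCell g w i j i j ++ [pairStr (j:Int) (i:Int)] ++ [rightRes g i j w] else midCell g w i j x y) := by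
      funext x y
      by_cases hxy : x = i ∧ y = j <;> simp [hxy]
    rw [hstart]
    have hmid0 : midCell g w i j i j = [] := by
      unfold midCell
      rw [if_neg (by omega)]
    have hstate : mSt w h (fun x y => if x = i ∧ y = j then
          midCell g w i j i j ++ [pairStr (j:Int) (i:Int)] ++ [rightRes g i j w] else midCell g w i j x y) =
        mSt w h (fun a b => retroCell g w i j i a b) := by
      apply mSt_congr
      intro a b ha hb
      by_cases hab : a = i ∧ b = j
      · obtain ⟨rfl, rfl⟩ := hab
        rw [if_pos ⟨rfl, rfl⟩, hmid0, midCell_self_node g w a b hni]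
        rfl
      · rw [if_neg hab]
        exact midCell_start g w i j a b hab
    rw [hstate]
    by_cases hi0 : 0 < i
    · rw [if_pos hi0]
      rw [retroFold g w h i j hh hw hni i (le_refl i)]
      rw [Nat.sub_self]
      apply mSt_congr
      intro a b ha hb
      exact retroCell_end g w i j a b
    · rw [if_neg hi0]
      have hieq : i = 0 := by omega
      apply mSt_congr
      intro a b ha hb
      subst hieq
      rw [← retroCell_end g w 0 j a b]
  · have hnn : isNode g i j = false := by simpa [isNode, lineOf] using hn
    rw [if_neg hn]
    rw [appendAt_mSt w h _ i j _ hh hw]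
    apply mSt_congr
    intro a b ha hb
    by_cases hab : a = i ∧ b = j
    · obtain ⟨rfl, rfl⟩ := hab
      rw [if_pos ⟨rfl, rfl⟩]
      have hmid0 : midCell g w a b a b = [] := by
        unfold midCell
        rw [if_neg (by omega)]
      rw [hmid0, midCell_self_empty g w a b hnn]
      rfl
    · rw [if_neg hab]
      exact midCell_outside g w i j a b hab hnn

theorem innerFold (g : List String) (w h i : Nat) (hh : i < h) :
    ∀ jj, jj ≤ w →
      (List.range jj).foldl (aInner g w i) (mSt w h (fun a b => midCell g w i 0 a b)) =
        mSt w h (fun a b => midCell g w i jj a b) := by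
  intro jj
  induction jj with
  | zero => intro _; simp
  | succ jj ih =>
    intro hj
    rw [List.range_succ, List.foldl_append]
    rw [ih (by omega)]
    simp only [List.foldl_cons, List.foldl_nil]
    exact innerStep g w h i jj hh (by omega)

theorem midCell_row_end (g : List String) (w h i a b : Nat) (hb : b < w) :
    midCell g w i w a b = midCell g w (i + 1) 0 a b := by
  unfold midCell
  by_cases hdone : a < i ∨ (a = i ∧ b < w)
  · rw [if_pos hdone, if_pos (Or.inl (by omega : a < i + 1))]
    rw [if_pos hb, if_neg (by omega : ¬ b < 0)]
  · rw [if_neg hdone, if_neg (by omega : ¬ (a < i + 1 ∨ (a = i + 1 ∧ b < 0)))]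

theorem outerFold (g : List String) (w h : Nat) :
    ∀ ii, ii ≤ h →
      (List.range ii).foldl (fun m i => (List.range w).foldl (aInner g w i) m)
          (List.replicate (w * h) []) =
        mSt w h (fun a b => midCell g w ii 0 a b) := by
  intro ii
  induction ii with
  | zero =>
    intro _
    rw [← mSt_zero w h]
    apply mSt_congr
    intro a b _ _
    unfold midCell
    rw [if_neg (by omega)]
  | succ ii ih =>
    intro hi
    rw [List.range_succ, List.foldl_append]
    rw [ih (by omega)]
    simp only [List.foldl_cons, List.foldl_nil]
    rw [innerFold g w h ii (by omega) w (le_refl w)]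
    apply mSt_congr
    intro a b ha hb
    exact midCell_row_end g w h ii a b hb


-- ---- the result-collection loop ----

def pick (c : List String) : Option String :=
  if (padTo3 c).getD 0 "" ≠ "-1 -1" then some (PySem.Str.join " " (padTo3 c)) else none

theorem getD_set_ne (l : List (List String)) (n k : Nat) (v : List String) (h : n ≠ k) :
    (l.set n v).getD k [] = l.getD k [] := by
  simp [List.getD_eq_getElem?_getD, h]

theorem finFold : ∀ (N : Nat) (m : List (List String)) (res : List String), N ≤ m.length →
    ((List.range N).foldl aFin (m, res)).1.length = m.length ∧
    (∀ k, N ≤ k → ((List.range N).foldl aFin (m, res)).1.getD k [] = m.getD k []) ∧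
    ((List.range N).foldl aFin (m, res)).2 =
      res ++ (List.range N).filterMap (fun k => pick (m.getD k [])) := by
  intro N
  induction N with
  | zero => intro m res _; simp
  | succ N ih =>
    intro m res hN
    obtain ⟨ih1, ih2, ih3⟩ := ih m res (by omega)
    rw [List.range_succ, List.foldl_append]
    simp only [List.foldl_cons, List.foldl_nil]
    have hcell : ((List.range N).foldl aFin (m, res)).1.getD N [] = m.getD N [] :=
      ih2 N (le_refl N)
    set st : List (List String) × List String := (List.range N).foldl aFin (m, res) with hst
    unfold aFin
    rw [hcell]
    by_cases hc : (padTo3 (m.getD N [])).getD 0 "" ≠ "-1 -1"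
    · rw [if_pos hc]
      refine ⟨by simpa using ih1, ?_, ?_⟩
      · intro k hk
        rw [getD_set_ne _ _ _ _ (by omega)]
        exact ih2 k (by omega)
      · have hp : pick (m.getD N []) = some (PySem.Str.join " " (padTo3 (m.getD N []))) := by
          unfold pick
          rw [if_pos hc]
        rw [ih3, List.filterMap_append]
        simp only [List.filterMap_cons, List.filterMap_nil, hp]
        simp [List.append_assoc]
    · rw [if_neg hc]
      refine ⟨by simpa using ih1, ?_, ?_⟩
      · intro k hk
        rw [getD_set_ne _ _ _ _ (by omega)]
        exact ih2 k (by omega)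
      · have hp : pick (m.getD N []) = none := by
          unfold pick
          rw [if_neg hc]
        rw [ih3, List.filterMap_append]
        simp only [List.filterMap_cons, List.filterMap_nil, hp]
        simp

-- ---- what one finished cell contributes to the output ----

theorem scanDown_eq (g : List String) (j : Nat) : ∀ (n lo : Nat),
    scanDown g j (List.range' lo n) =
      (match (List.range' lo n).filter (fun k => isNode g k j) with
       | [] => "-1 -1"
       | k :: _ => pairStr j k) := by
  intro n
  induction n with
  | zero => intro lo; simp [scanDown]
  | succ n ih =>
    intro lo
    rw [List.range'_succ, scanDown]
    by_cases hn : ((g.getD lo "").toList).getD j ' ' = '0'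
    · rw [if_pos hn]
      have h2 : isNode g lo j = true := by simpa [isNode, lineOf] using hn
      simp [h2]
    · rw [if_neg hn]
      have h2 : isNode g lo j = false := by simpa [isNode, lineOf] using hn
      rw [ih (lo + 1)]
      simp [h2]

theorem pick_cell (g : List String) (w h a b : Nat) (ha : a < h) (hb : b < w)
    (hlen : w ≤ ((g.getD a "").toList).length) :
    pick (cellCore g w h a b) =
      (if ((g.getD a "").toList).getD b ' ' = '0' then
        some (pairStr (b : Int) (a : Int) ++ " " ++
          scanRight ((g.getD a "").toList) a (List.range' (b + 1) (w - (b + 1))) ++ " " ++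
          scanDown g b (List.range' (a + 1) (h - (a + 1))))
      else none) := by
  have hsd := scanDown_eq g b (h - (a + 1)) (a + 1)
  have hsr := scanRight_eq_rightRes g a b w hb (by unfold lineOf; exact hlen)
  unfold lineOf at hsr
  have hnb : (List.range' (a + 1) (h - (a + 1))).filter (fun k => isNode g k b) =
      nbI g b (a + 1) h := rfl
  rw [hnb] at hsd
  by_cases hn : ((g.getD a "").toList).getD b ' ' = '0'
  · have hni : isNode g a b = true := by simpa [isNode, lineOf] using hn
    rw [if_pos hn]
    unfold pick cellCore
    rw [hni]
    simp only [if_true]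
    cases hnbl : nbI g b (a + 1) h with
    | nil =>
      rw [hnbl] at hsd
      have hsd' : scanDown g b (List.range' (a + 1) (h - (a + 1))) = "-1 -1" := by rw [hsd]
      simp only [List.map_nil, List.take_nil, List.append_nil]
      rw [padTo3_two]
      rw [if_pos (by simpa using pairStr_ne b a)]
      rw [joinSpace3, hsr, hsd']
    | cons k ks =>
      rw [hnbl] at hsd
      have hsd' : scanDown g b (List.range' (a + 1) (h - (a + 1))) =
          pairStr (b : Int) (k : Int) := by rw [hsd]
      have hcell : [pairStr (b : Int) (a : Int), rightRes g a b w] ++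
          (List.map (fun k : Nat => pairStr (b : Int) (k : Int)) (k :: ks)).take 1 =
          [pairStr (b : Int) (a : Int), rightRes g a b w, pairStr (b : Int) (k : Int)] := by
        simp
      rw [hcell, padTo3_three]
      rw [if_pos (by simpa using pairStr_ne b a)]
      rw [joinSpace3, hsr, hsd']
  · have hni : isNode g a b = false := by simpa [isNode, lineOf] using hn
    rw [if_neg hn]
    unfold pick cellCore
    rw [hni]
    simp only [Bool.false_eq_true, if_false]
    rcases hnbl : nbI g b (a + 1) h with _ | ⟨k1, _ | ⟨k2, ks⟩⟩
    · simp only [List.map_nil, List.take_nil]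
      rw [padTo3_one]
      rw [if_neg (by simp)]
    · have hcell : ("-1 -1" :: (List.map (fun k : Nat => pairStr (b : Int) (k : Int)) [k1]).take 2) =
          ["-1 -1", pairStr (b : Int) (k1 : Int)] := by simp
      rw [hcell, padTo3_two]
      rw [if_neg (by simp)]
    · have hcell : ("-1 -1" ::
          (List.map (fun k : Nat => pairStr (b : Int) (k : Int)) (k1 :: k2 :: ks)).take 2) =
          ["-1 -1", pairStr (b : Int) (k1 : Int), pairStr (b : Int) (k2 : Int)] := by simp
      rw [hcell, padTo3_three]
      rw [if_neg (by simp)]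


-- ---- assembling both programs into the same normal form ----

theorem B_unfold (g : List String) :
    solve_there_is_no_spoon_problem_alt g =
      (List.range g.length).foldl (fun results i =>
        (List.range ((g.getD 0 "").toList).length).foldl (fun results j =>
          if ((g.getD i "").toList).getD j ' ' = '0' then
            results ++ [pairStr (j : Int) (i : Int) ++ " " ++
              scanRight ((g.getD i "").toList) i
                (List.range' (j + 1) (((g.getD 0 "").toList).length - (j + 1))) ++ " " ++
              scanDown g j (List.range' (i + 1) (g.length - (i + 1)))]
          else results) results) [] := rfl

theorem A_result (g : List String) (w h : Nat) (hw : ((g.getD 0 "").toList).length = w)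
    (hh : g.length = h) :
    solve_there_is_no_spoon_problem g =
      (List.range h).flatMap (fun a =>
        (List.range w).filterMap (fun b => pick (cellCore g w h a b))) := by
  subst hw hh
  rw [A_unfold]
  rw [outerFold g ((g.getD 0 "").toList).length g.length g.length (le_refl _)]
  rw [(finFold (((g.getD 0 "").toList).length * g.length)
    (mSt ((g.getD 0 "").toList).length g.length
      (fun a b => midCell g ((g.getD 0 "").toList).length g.length 0 a b)) []
    (by rw [mSt_length])).2.2]
  rw [List.nil_append]
  rw [range_mul_flat ((g.getD 0 "").toList).length g.length, List.filterMap_flatMap]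
  apply List.flatMap_congr
  intro a hamem
  rw [List.mem_range] at hamem
  rw [List.filterMap_map]
  apply List.filterMap_congr
  intro b hbmem
  rw [List.mem_range] at hbmem
  simp only [Function.comp]
  rw [mSt_getD _ _ _ a b hamem hbmem]
  have hmc : midCell g ((g.getD 0 "").toList).length g.length 0 a b =
      cellCore g ((g.getD 0 "").toList).length g.length a b := by
    unfold midCell
    rw [if_pos (Or.inl hamem), if_neg (by omega : ¬ b < 0)]
  rw [hmc]

theorem B_result (g : List String) (w h : Nat) (hw : ((g.getD 0 "").toList).length = w)
    (hh : g.length = h) :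
    solve_there_is_no_spoon_problem_alt g =
      (List.range h).flatMap (fun a =>
        (List.range w).filterMap (fun b =>
          if ((g.getD a "").toList).getD b ' ' = '0' then
            some (pairStr (b : Int) (a : Int) ++ " " ++
              scanRight ((g.getD a "").toList) a (List.range' (b + 1) (w - (b + 1))) ++ " " ++
              scanDown g b (List.range' (a + 1) (h - (a + 1))))
          else none)) := by
  subst hw hh
  rw [B_unfold]
  have hbody : (fun (results : List String) (i : Nat) =>
      (List.range ((g.getD 0 "").toList).length).foldl (fun results j =>
        if ((g.getD i "").toList).getD j ' ' = '0' then
          results ++ [pairStr (j : Int) (i : Int) ++ " " ++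
            scanRight ((g.getD i "").toList) i
              (List.range' (j + 1) (((g.getD 0 "").toList).length - (j + 1))) ++ " " ++
            scanDown g j (List.range' (i + 1) (g.length - (i + 1)))]
        else results) results) =
      (fun (results : List String) (i : Nat) =>
        results ++ (List.range ((g.getD 0 "").toList).length).filterMap (fun j =>
          if ((g.getD i "").toList).getD j ' ' = '0' then
            some (pairStr (j : Int) (i : Int) ++ " " ++
              scanRight ((g.getD i "").toList) i
                (List.range' (j + 1) (((g.getD 0 "").toList).length - (j + 1))) ++ " " ++
              scanDown g j (List.range' (i + 1) (g.length - (i + 1))))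
          else none)) := by
    funext results i
    exact appendIf_fold _ _ _
  rw [hbody]
  rw [PySem.List.foldl_append_eq_flatMap]
  rw [List.nil_append]

-- ===== VERDICT (by name: the statement is the Claim_ definition above) =====
theorem solve_there_is_no_spoon_problem_spec : Claim_equal_solve_there_is_no_spoon_problem := by
  intro g _ hpre
  obtain ⟨hne, hrows⟩ := hpre
  unfold Spec_solve_there_is_no_spoon_problem
  rw [A_result g (((g.getD 0 "").toList).length) g.length rfl rfl,
    B_result g (((g.getD 0 "").toList).length) g.length rfl rfl]
  apply List.flatMap_congr
  intro a hamem
  rw [List.mem_range] at hamem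
  apply List.filterMap_congr
  intro b hbmem
  rw [List.mem_range] at hbmem
  have hlen : ((g.getD 0 "").toList).length ≤ ((g.getD a "").toList).length := by
    apply hrows
    rw [List.getD_eq_getElem g "" hamem]
    exact List.getElem_mem _
  exact pick_cell g (((g.getD 0 "").toList).length) g.length a b hamem hbmem hlen
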